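-- pv_equiv track=rewrite | github.com/JialongZhou666/subtree-mode-mining | sequence_classification_rf.py | generate_kmers
-- ===== SOURCE A (Python) =====
-- def generate_kmers(sequence, k):
--     sequence = sequence.upper().strip()
--     kmers = []
--     for i in range(len(sequence) - k + 1):
--         kmer = sequence[i:i+k]
--         if all(c in 'ATCGUN' for c in kmer):
--             kmers.append(kmer)
--     return kmers
-- ===== SOURCE B (Python) =====
-- def generate_kmers(sequence, k):
--     s = sequence.upper().strip()
--     if k < 0:
--         return []
--     kmers = []
--     run_start = 0
--     for j, c in enumerate(s):
--         if c not in 'ATCGUN':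
--             for i in range(run_start, j - k + 1):
--                 kmers.append(s[i:i+k])
--             run_start = j + 1
--     for i in range(run_start, len(s) - k + 1):
--         kmers.append(s[i:i+k])
--     return kmers
-- ===== Notes on version B (the rewrite author's own statement) =====
-- stated objective: faster
-- what changed: Replaces A's per-window rescan of every slice with a single left-to-right scan over maximal runs of valid nucleotide characters that emits all k-mers inside each run, so each character's validity is examined once instead of once per overlapping window.
-- intended difference: For k < 0, A returns a nonempty list of accidental slices and empty strings produced by Python's negative-slice wraparound (at the witness ('A', -1), A returns ['', '', '']), while B returns [], the intended 'there are no k-mers of negative length'. — e.g. on generate_kmers("A", -1): A returns ["", "", ""], B returns []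
import Mathlib
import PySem

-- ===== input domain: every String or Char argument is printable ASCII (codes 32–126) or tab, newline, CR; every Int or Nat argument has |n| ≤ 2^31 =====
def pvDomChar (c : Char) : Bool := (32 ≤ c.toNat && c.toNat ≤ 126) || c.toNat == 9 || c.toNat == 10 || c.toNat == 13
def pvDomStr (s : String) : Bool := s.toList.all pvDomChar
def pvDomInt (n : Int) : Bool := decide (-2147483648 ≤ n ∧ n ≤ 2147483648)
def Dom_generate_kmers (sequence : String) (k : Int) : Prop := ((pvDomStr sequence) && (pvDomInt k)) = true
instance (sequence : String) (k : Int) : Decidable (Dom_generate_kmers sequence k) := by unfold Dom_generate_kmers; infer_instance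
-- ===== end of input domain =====

-- B replaces A's per-window rescan by a single left-to-right scan over maximal runs of valid
-- nucleotide characters, emitting every k-mer inside each run; for k < 0 B returns [] where A
-- returns accidental slices (the intended difference D_ below).

-- shared atoms: the membership test 'c in "ATCGUN"' and the slice s[i:i+k], which both Pythons
-- write with the same expressions
def pvCharOK (c : Char) : Bool := "ATCGUN".toList.contains c
def pvKmer (s : String) (k : Int) (i : Int) : String :=
  PySem.Str.slice s (some i) (some (i + k))

-- ===== PORT A =====
def generate_kmers (sequence : String) (k : Int) : List String :=
  let s := PySem.Str.strip (PySem.Str.upper sequence)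
  (PySem.List.pyRange 0 ((PySem.Str.len s : Int) - k + 1) 1).foldl
    (fun kmers i =>
      let kmer := pvKmer s k i
      if kmer.toList.all pvCharOK then kmers ++ [kmer] else kmers)
    []

-- ===== PORT B =====
-- loop body of B's scan: on an invalid character at index j, flush the k-mers of the run that
-- ends there and restart the run at j + 1
def pvBStep (s : String) (k : Int) (p : Int × List String) (jc : Int × Char) :
    Int × List String :=
  if !(pvCharOK jc.2) then
    (jc.1 + 1,
     p.2 ++ (PySem.List.pyRange p.1 (jc.1 - k + 1) 1).map (pvKmer s k))
  else p

def generate_kmers_alt (sequence : String) (k : Int) : List String :=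
  let s := PySem.Str.strip (PySem.Str.upper sequence)
  if k < 0 then []
  else
    let st := (PySem.List.enumerate s.toList 0).foldl (pvBStep s k) (0, [])
    st.2 ++ (PySem.List.pyRange st.1 ((PySem.Str.len s : Int) - k + 1) 1).map (pvKmer s k)

-- ===== PRECONDITION & SPEC =====
-- For k < 0, A returns a nonempty list of accidental slices and empty strings (at the witness ('A', -1)
-- A returns ['', '', '']), an artefact of Python's negative-slice wraparound; B returns [],
-- the intended 'there are no k-mers of negative length'.
def D_generate_kmers (sequence : String) (k : Int) : Prop := k < 0
instance (sequence : String) (k : Int) : Decidable (D_generate_kmers sequence k) := by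
  unfold D_generate_kmers; infer_instance

def Spec_generate_kmers (sequence : String) (k : Int) (out : List String) : Prop :=
  ¬ D_generate_kmers sequence k → out = generate_kmers_alt sequence k
instance (sequence : String) (k : Int) (out : List String) :
    Decidable (Spec_generate_kmers sequence k out) := by
  unfold Spec_generate_kmers; infer_instance

def pvDiffWitness_generate_kmers : String × Int := ("A", -1)
def pvDiffWitnessOut_generate_kmers : (List String) × (List String) := (["", "", ""], [])

-- ===== CLAIM (what is proved, stated in full; the proofs are below) =====
def Claim_unchanged_generate_kmers : Prop := ∀ (sequence : String) (k : Int),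
  Dom_generate_kmers sequence k → Spec_generate_kmers sequence k (generate_kmers sequence k)
def Claim_changed_generate_kmers : Prop :=
  Dom_generate_kmers (pvDiffWitness_generate_kmers.1) (pvDiffWitness_generate_kmers.2) ∧
  D_generate_kmers (pvDiffWitness_generate_kmers.1) (pvDiffWitness_generate_kmers.2) ∧
  generate_kmers (pvDiffWitness_generate_kmers.1) (pvDiffWitness_generate_kmers.2) = pvDiffWitnessOut_generate_kmers.1 ∧
  generate_kmers_alt (pvDiffWitness_generate_kmers.1) (pvDiffWitness_generate_kmers.2) = pvDiffWitnessOut_generate_kmers.2 ∧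
  pvDiffWitnessOut_generate_kmers.1 ≠ pvDiffWitnessOut_generate_kmers.2
def Claim_exact_generate_kmers : Prop := ∀ (sequence : String) (k : Int),
  Dom_generate_kmers sequence k → D_generate_kmers sequence k →
  generate_kmers sequence k ≠ generate_kmers_alt sequence k

-- ===== LEMMAS AND PROOFS =====

-- the window test A performs, as a predicate on the start index
def pvValid (s : String) (k : Int) (i : Int) : Bool := (pvKmer s k i).toList.all pvCharOK

lemma pvKmer_toList (s : String) (k i : Int) (hi : 0 ≤ i) (hk : 0 ≤ k) :
    (pvKmer s k i).toList = (s.toList.drop i.toNat).take k.toNat := by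
  unfold pvKmer
  rw [PySem.Str.toList_slice]
  simp only [PySem.Chars.slice_eq_listSlice]
  rw [PySem.List.slice_toNat _ hi (by omega)]
  congr 1
  omega

-- a window lying inside a run of valid characters passes A's test
lemma pvValid_of_run (s : String) (k : Int) (hk : 0 ≤ k) (j0 : Nat)
    (hj0 : j0 ≤ s.toList.length)
    (r : Int) (hr : 0 ≤ r)
    (hrun : ∀ x : Nat, (hx : x < s.toList.length) → r ≤ (x : Int) → x < j0 →
      pvCharOK (s.toList[x]'hx) = true)
    (i : Int) (hri : r ≤ i) (hik : i + k ≤ (j0 : Int)) :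
    pvValid s k i = true := by
  unfold pvValid
  rw [pvKmer_toList s k i (by omega) hk, List.all_eq_true]
  intro c hc
  obtain ⟨q, hq, rfl⟩ := List.mem_iff_getElem.mp hc
  have hql : q < k.toNat := by
    have := hq; simp only [List.length_take, List.length_drop, lt_min_iff] at this; omega
  have hqd : q < s.toList.length - i.toNat := by
    have := hq; simp only [List.length_take, List.length_drop, lt_min_iff] at this; omega
  rw [List.getElem_take, List.getElem_drop]
  exact hrun (i.toNat + q) (by omega) (by push_cast; omega) (by omega)

-- a window containing an invalid character fails A's test
lemma pvValid_false (s : String) (k : Int) (hk : 0 ≤ k) (j0 : Nat)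
    (hj0 : j0 < s.toList.length)
    (hbad : pvCharOK (s.toList[j0]'hj0) = false)
    (i : Int) (hi : 0 ≤ i) (hij : i ≤ (j0 : Int)) (hji : (j0 : Int) < i + k) :
    pvValid s k i = false := by
  unfold pvValid
  rw [pvKmer_toList s k i hi hk]
  apply Bool.eq_false_iff.mpr
  intro hall
  rw [List.all_eq_true] at hall
  have hmem : s.toList[j0]'hj0 ∈ (s.toList.drop i.toNat).take k.toNat := by
    have h1 : j0 - i.toNat < k.toNat := by omega
    have h2 : j0 - i.toNat < (s.toList.drop i.toNat).length := by
      simp only [List.length_drop]; omega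
    have : ((s.toList.drop i.toNat).take k.toNat)[j0 - i.toNat]'(by
        simp only [List.length_take, List.length_drop, lt_min_iff]; omega) = s.toList[j0]'hj0 := by
      rw [List.getElem_take, List.getElem_drop]
      congr 1
      omega
    rw [← this]
    exact List.getElem_mem _
  have := hall _ hmem
  rw [hbad] at this
  exact Bool.false_ne_true this

-- splitting A's filtered range at an invalid character
lemma pv_filter_split (p : Int → Bool) (k r j b : Int) (hk : 0 ≤ k)
    (hrj : r ≤ j) (hjb : j - k + 1 ≤ b)
    (h1 : ∀ i, r ≤ i → i + k ≤ j → p i = true)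
    (h2 : ∀ i, r ≤ i → i ≤ j → j < i + k → p i = false) :
    (PySem.List.pyRange r b 1).filter p
      = PySem.List.pyRange r (j - k + 1) 1 ++ (PySem.List.pyRange (j + 1) b 1).filter p := by
  by_cases hbr : b ≤ r
  · rw [PySem.List.pyRange_one_eq_nil hbr, PySem.List.pyRange_one_eq_nil (by omega),
        PySem.List.pyRange_one_eq_nil (by omega)]
    simp
  · have hbr' : r < b := by omega
    have hm2b : min (j + 1) b ≤ b := by omega
    have hrm2 : r ≤ min (j + 1) b := by omega
    rw [PySem.List.pyRange_one_append r (min (j + 1) b) b hrm2 hm2b, List.filter_append]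
    have hp1 : r ≤ max r (j - k + 1) := le_max_left _ _
    have hp1m : max r (j - k + 1) ≤ min (j + 1) b := by omega
    rw [PySem.List.pyRange_one_append r (max r (j - k + 1)) (min (j + 1) b) hp1 hp1m,
        List.filter_append]
    have e1 : (PySem.List.pyRange r (max r (j - k + 1)) 1).filter p
        = PySem.List.pyRange r (j - k + 1) 1 := by
      rw [List.filter_eq_self.mpr]
      · by_cases h : r ≤ j - k + 1
        · rw [max_eq_right h]
        · rw [max_eq_left (by omega), PySem.List.pyRange_one_eq_nil le_rfl,
              PySem.List.pyRange_one_eq_nil (by omega)]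
      · intro i hi
        rw [PySem.List.mem_pyRange_one] at hi
        exact h1 i hi.1 (by omega)
    have e2 : (PySem.List.pyRange (max r (j - k + 1)) (min (j + 1) b) 1).filter p = [] := by
      rw [List.filter_eq_nil_iff]
      intro i hi
      rw [PySem.List.mem_pyRange_one] at hi
      simp [h2 i (by omega) (by omega) (by omega)]
    have e3 : (PySem.List.pyRange (min (j + 1) b) b 1).filter p
        = (PySem.List.pyRange (j + 1) b 1).filter p := by
      by_cases h : j + 1 ≤ b
      · rw [min_eq_left h]
      · rw [min_eq_right (by omega), PySem.List.pyRange_one_eq_nil le_rfl,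
            PySem.List.pyRange_one_eq_nil (by omega)]
    rw [e1, e2, e3]
    simp

-- main invariant of B's scan: from a state whose run starts at r (all characters in [r, j0)
-- valid), the loop plus the final flush produce exactly A's remaining filtered windows
lemma pv_b_loop (s : String) (k : Int) (hk : 0 ≤ k) :
    ∀ (m : List Char) (j0 : Nat) (r : Int) (acc : List String),
    m = s.toList.drop j0 → j0 ≤ s.toList.length → 0 ≤ r → r ≤ (j0 : Int) →
    (∀ x : Nat, (hx : x < s.toList.length) → r ≤ (x : Int) → x < j0 →
      pvCharOK (s.toList[x]'hx) = true) →
    (((PySem.List.enumerate m (j0 : Int)).foldl (pvBStep s k) (r, acc)).2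
      ++ (PySem.List.pyRange
            ((PySem.List.enumerate m (j0 : Int)).foldl (pvBStep s k) (r, acc)).1
            ((s.toList.length : Int) - k + 1) 1).map (pvKmer s k))
    = acc ++ ((PySem.List.pyRange r ((s.toList.length : Int) - k + 1) 1).filter
        (pvValid s k)).map (pvKmer s k) := by
  intro m
  induction m with
  | nil =>
    intro j0 r acc hm hj0 hr hrj hrun
    have hjn : j0 = s.toList.length := by
      have := List.drop_eq_nil_iff.mp hm.symm
      omega
    rw [PySem.List.enumerate_nil]
    simp only [List.foldl_nil]
    congr 1
    rw [List.filter_eq_self.mpr]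
    intro i hi
    rw [PySem.List.mem_pyRange_one] at hi
    exact pvValid_of_run s k hk j0 (by omega) r hr hrun i hi.1 (by omega)
  | cons c m' ih =>
    intro j0 r acc hm hj0 hr hrj hrun
    have hjlt : j0 < s.toList.length := by
      by_contra h
      rw [List.drop_eq_nil_iff.mpr (by omega)] at hm
      exact List.cons_ne_nil _ _ hm
    have hdr : s.toList.drop j0 = s.toList[j0] :: s.toList.drop (j0 + 1) :=
      List.drop_eq_getElem_cons hjlt
    rw [hdr] at hm
    obtain ⟨hc, hm'⟩ := List.cons_eq_cons.mp hm.symm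
    rw [PySem.List.enumerate_cons, List.foldl_cons]
    have hcast : (j0 : Int) + 1 = ((j0 + 1 : Nat) : Int) := by push_cast; ring
    by_cases hok : pvCharOK c = true
    · have hstep : pvBStep s k (r, acc) ((j0 : Int), c) = (r, acc) := by
        simp [pvBStep, hok]
      rw [hstep, hcast, ih (j0 + 1) r acc hm'.symm (by omega) hr (by push_cast; omega)
        (fun x hx hrx hxj => by
          by_cases hxe : x = j0
          · subst hxe; rw [hc]; exact hok
          · exact hrun x hx hrx (by omega))]
    · have hok' : pvCharOK c = false := by simpa using hok
      have hstep : pvBStep s k (r, acc) ((j0 : Int), c)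
          = ((j0 : Int) + 1, acc ++ (PySem.List.pyRange r ((j0 : Int) - k + 1) 1).map (pvKmer s k)) := by
        simp [pvBStep, hok']
      rw [hstep, hcast,
        ih (j0 + 1) (((j0 + 1 : Nat) : Int)) _ hm'.symm (by omega) (by push_cast; omega) (by push_cast; omega)
          (fun x hx hrx hxj => by push_cast at hrx; omega)]
      rw [pv_filter_split (pvValid s k) k r (j0 : Int) _ hk hrj (by omega)
        (fun i hi hik => pvValid_of_run s k hk j0 (by omega) r hr hrun i hi hik)
        (fun i hi hij hji => pvValid_false s k hk j0 hjlt (by rw [hc]; exact hok') i (by omega) hij hji)]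
      simp [List.map_append]

-- A's loop is 'filter then map' over its range
lemma pv_A_form (s : String) (k : Int) :
    (PySem.List.pyRange 0 ((PySem.Str.len s : Int) - k + 1) 1).foldl
      (fun kmers i =>
        let kmer := pvKmer s k i
        if kmer.toList.all pvCharOK then kmers ++ [kmer] else kmers) []
    = ((PySem.List.pyRange 0 ((PySem.Str.len s : Int) - k + 1) 1).filter
        (pvValid s k)).map (pvKmer s k) := by
  have hfun : (fun (kmers : List String) (i : Int) =>
      let kmer := pvKmer s k i
      if kmer.toList.all pvCharOK then kmers ++ [kmer] else kmers)
      = (fun (acc : List String) (x : Int) =>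
          if pvValid s k x then acc ++ [pvKmer s k x] else acc) := rfl
  rw [hfun, PySem.List.foldl_append_if (pvValid s k) (pvKmer s k)]
  simp

-- ===== VERDICT (by name: the statement is the Claim_ definition above) =====
theorem generate_kmers_spec : Claim_unchanged_generate_kmers := by
  intro sequence k hdom hnd
  have hk : 0 ≤ k := by unfold D_generate_kmers at hnd; omega
  show generate_kmers sequence k = generate_kmers_alt sequence k
  simp only [generate_kmers, generate_kmers_alt]
  rw [if_neg (by omega : ¬ k < 0), pv_A_form]
  have hlen : (PySem.Str.len (PySem.Str.strip (PySem.Str.upper sequence)) : Int)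
      = ((PySem.Str.strip (PySem.Str.upper sequence)).toList.length : Int) := by
    simp [PySem.Str.len_eq]
  rw [hlen]
  have hb := pv_b_loop (PySem.Str.strip (PySem.Str.upper sequence)) k hk
    (PySem.Str.strip (PySem.Str.upper sequence)).toList 0 0 []
    (by simp) (by omega) le_rfl (by simp) (by omega)
  simp only [Nat.cast_zero] at hb
  rw [hb]
  simp

theorem generate_kmers_changed : Claim_changed_generate_kmers := by
  unfold Claim_changed_generate_kmers; decide

theorem generate_kmers_tight : Claim_exact_generate_kmers := by
  intro sequence k hdom hd
  have hd' : k < 0 := hd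
  simp only [generate_kmers, generate_kmers_alt]
  rw [if_pos hd', pv_A_form]
  have hlen : (PySem.Str.len (PySem.Str.strip (PySem.Str.upper sequence)) : Int)
      = ((PySem.Str.strip (PySem.Str.upper sequence)).toList.length : Int) := by
    simp [PySem.Str.len_eq]
  rw [hlen]
  have hn : (0 : Int) ≤ ((PySem.Str.strip (PySem.Str.upper sequence)).toList.length : Int) :=
    Int.natCast_nonneg _
  have hvalid : pvValid (PySem.Str.strip (PySem.Str.upper sequence)) k
      (((PySem.Str.strip (PySem.Str.upper sequence)).toList.length : Int) - k) = true := by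
    unfold pvValid pvKmer
    rw [PySem.Str.toList_slice]
    simp only [PySem.Chars.slice_eq_listSlice]
    rw [PySem.List.slice_toNat _ (by omega) (by omega)]
    rw [List.drop_eq_nil_of_le (by omega)]
    simp
  have hmem : (((PySem.Str.strip (PySem.Str.upper sequence)).toList.length : Int) - k)
      ∈ (PySem.List.pyRange 0
          (((PySem.Str.strip (PySem.Str.upper sequence)).toList.length : Int) - k + 1) 1).filter
        (pvValid (PySem.Str.strip (PySem.Str.upper sequence)) k) :=
    List.mem_filter.mpr ⟨PySem.List.mem_pyRange_one.mpr ⟨by omega, by omega⟩, hvalid⟩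
  exact List.ne_nil_of_mem (List.mem_map_of_mem hmem)
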